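-- pv_equiv track=rewrite | github.com/Inejka/project_skonchalsya | translate.py | break_text_into_chunks
-- ===== SOURCE A (Python) =====
-- from typing import Iterator
--
-- useful_words = ["ShowText(", "Display Name", "ShowChoices", "display_skill_name", "ScriptMore", "unlimited_choices", "ex_choice_add", "When"]
--
-- def keep_line(line):
--     for word in useful_words:
--         if word in line:
--             return True
--     return False
--
-- def break_text_into_chunks(text: str) -> Iterator[str]:
--     text = text.split("\n")
--     first = 0
--     last = 0
--     while last < len(text):
--         while first < len(text) and not keep_line(text[first]):
--             first += 1
--         last = first + 1
--         while last < len(text) and keep_line(text[last]):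
--             last += 1
--         if first != len(text):
--             yield "\n".join(text[first:last])
--         first = last
-- ===== SOURCE B (Python) =====
-- from typing import Iterator
--
-- useful_words = ["ShowText(", "Display Name", "ShowChoices", "display_skill_name", "ScriptMore", "unlimited_choices", "ex_choice_add", "When"]
--
-- def keep_line(line):
--     return any(word in line for word in useful_words)
--
-- def break_text_into_chunks(text: str) -> Iterator[str]:
--     buf = []
--     for line in text.split("\n"):
--         if keep_line(line):
--             buf.append(line)
--         elif buf:
--             yield "\n".join(buf)
--             buf = []
--     if buf:
--         yield "\n".join(buf)
-- ===== Notes on version B (the rewrite author's own statement) =====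
-- stated objective: simpler
-- what changed: Replaced the nested two-pointer index scans with a single for-loop over the split lines that keeps a running buffer and flushes it as a chunk on each non-useful line and once at the end.
import Mathlib
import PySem

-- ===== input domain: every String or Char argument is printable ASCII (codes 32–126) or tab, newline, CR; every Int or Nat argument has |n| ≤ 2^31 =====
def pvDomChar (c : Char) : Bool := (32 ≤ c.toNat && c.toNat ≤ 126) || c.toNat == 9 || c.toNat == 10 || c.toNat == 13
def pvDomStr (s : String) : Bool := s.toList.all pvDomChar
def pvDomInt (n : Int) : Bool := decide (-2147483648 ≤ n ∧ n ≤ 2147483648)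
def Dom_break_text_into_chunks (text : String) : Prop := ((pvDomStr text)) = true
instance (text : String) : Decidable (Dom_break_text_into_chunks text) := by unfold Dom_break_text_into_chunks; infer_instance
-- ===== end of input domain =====

-- B replaces A's nested two-pointer index scans with one pass that flushes a running buffer;
-- objective: simpler. The returned chunk list is proved equal on all inputs.

def usefulWords : List String :=
  ["ShowText(", "Display Name", "ShowChoices", "display_skill_name", "ScriptMore",
   "unlimited_choices", "ex_choice_add", "When"]

-- ===== PORT A =====
-- keep_line: for-loop with early return, as recursion over the word list
def keepLineA : List String → String → Bool
  | [], _ => false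
  | w :: ws, line => if PySem.Str.isIn w line then true else keepLineA ws line

-- 'while i < len(text) and cond(text[i]): i += 1' — the index-advancing inner-while shape
def advA (lines : List String) (p : String → Bool) (i : Nat) : Nat :=
  if h : i < lines.length ∧ p (lines.getD i "") = true then advA lines p (i + 1) else i
termination_by lines.length - i

-- needed by outerA's termination proof (cited there by name)
theorem advA_le_aux (lines : List String) (p : String → Bool) :
    ∀ (n i : Nat), lines.length - i ≤ n → i ≤ advA lines p i := by
  intro n
  induction n with
  | zero =>
    intro i h
    rw [advA, dif_neg (by intro hc; omega)]
  | succ n ih =>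
    intro i h
    by_cases hc : i < lines.length ∧ p (lines.getD i "") = true
    · rw [advA, dif_pos hc]
      have := ih (i + 1) (by omega)
      omega
    · rw [advA, dif_neg hc]

theorem advA_le (lines : List String) (p : String → Bool) (i : Nat) : i ≤ advA lines p i :=
  advA_le_aux lines p lines.length i (by omega)

-- the outer 'while last < len(text)' loop; at its head first = last always, carried as 'last'
def outerA (lines : List String) (last : Nat) (acc : List String) : List String :=
  if _h : last < lines.length then
    let first := advA lines (fun l => !keepLineA usefulWords l) last
    let last' := advA lines (fun l => keepLineA usefulWords l) (first + 1)
    let acc' := if first ≠ lines.length then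
        acc ++ [PySem.Str.join "\n" (PySem.List.slice lines (some (first : Int)) (some (last' : Int)))]
      else acc
    outerA lines last' acc'
  else acc
termination_by lines.length - last
decreasing_by
  have h1 : last ≤ advA lines (fun l => !keepLineA usefulWords l) last := advA_le lines _ last
  have h2 := advA_le lines (fun l => keepLineA usefulWords l)
    (advA lines (fun l => !keepLineA usefulWords l) last + 1)
  omega

def break_text_into_chunks (text : String) : List String :=
  outerA ((PySem.Str.split? text "\n").getD []) 0 []

-- ===== PORT B =====
def keepLineB (line : String) : Bool := usefulWords.any (fun w => PySem.Str.isIn w line)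

-- the for-loop over the lines, carrying the running buffer; trailing flush at the end
def bufLoop : List String → List String → List String
  | [], buf => if buf.isEmpty then [] else [PySem.Str.join "\n" buf]
  | l :: rest, buf =>
    if keepLineB l then bufLoop rest (buf ++ [l])
    else if buf.isEmpty then bufLoop rest buf
    else PySem.Str.join "\n" buf :: bufLoop rest []

def break_text_into_chunks_alt (text : String) : List String :=
  bufLoop ((PySem.Str.split? text "\n").getD []) []

-- ===== PRECONDITION & SPEC =====
def Spec_break_text_into_chunks (text : String) (out : List String) : Prop := out = break_text_into_chunks_alt text
instance (text : String) (out : List String) : Decidable (Spec_break_text_into_chunks text out) := by unfold Spec_break_text_into_chunks; infer_instance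

-- ===== CLAIM (what is proved, stated in full; the proofs are below) =====
def Claim_equal_break_text_into_chunks : Prop := ∀ (text : String), Dom_break_text_into_chunks text → Spec_break_text_into_chunks text (break_text_into_chunks text)

-- ===== LEMMAS AND PROOFS =====

theorem keepLineA_eq (ws : List String) (l : String) :
    keepLineA ws l = ws.any (fun w => PySem.Str.isIn w l) := by
  induction ws with
  | nil => rfl
  | cons w ws ih =>
    rw [List.any_cons]
    cases hW : PySem.Str.isIn w l
    · rw [keepLineA, if_neg (by rw [hW]; simp), ih]
      simp
    · rw [keepLineA, if_pos hW]
      simp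

theorem keepLineA_eq_keepLineB (l : String) : keepLineA usefulWords l = keepLineB l :=
  keepLineA_eq usefulWords l

theorem advA_eq_aux (lines : List String) (p : String → Bool) :
    ∀ (n i : Nat), lines.length - i ≤ n →
      advA lines p i = i + ((lines.drop i).takeWhile p).length := by
  intro n
  induction n with
  | zero =>
    intro i h
    rw [advA, dif_neg (by intro hc; omega), List.drop_eq_nil_of_le (by omega)]
    simp
  | succ n ih =>
    intro i h
    by_cases hc : i < lines.length ∧ p (lines.getD i "") = true
    · obtain ⟨hlt, hp⟩ := hc
      rw [advA, dif_pos ⟨hlt, hp⟩, ih (i + 1) (by omega)]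
      have hd : lines.drop i = lines[i] :: lines.drop (i + 1) := List.drop_eq_getElem_cons hlt
      have hg : lines.getD i "" = lines[i] := List.getD_eq_getElem lines "" hlt
      rw [hd, List.takeWhile_cons_of_pos (by rw [← hg]; exact hp)]
      simp [Nat.add_comm, Nat.add_assoc]
    · rw [advA, dif_neg hc]
      rcases Nat.lt_or_ge i lines.length with hlt | hge
      · have hd : lines.drop i = lines[i] :: lines.drop (i + 1) := List.drop_eq_getElem_cons hlt
        have hg : lines.getD i "" = lines[i] := List.getD_eq_getElem lines "" hlt
        have hp : p lines[i] = false := by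
          by_contra hcc
          exact hc ⟨hlt, by rw [hg]; simpa using hcc⟩
        rw [hd, List.takeWhile_cons_of_neg (by simp [hp])]
        simp
      · rw [List.drop_eq_nil_of_le hge]
        simp

theorem advA_eq (lines : List String) (p : String → Bool) (i : Nat) :
    advA lines p i = i + ((lines.drop i).takeWhile p).length :=
  advA_eq_aux lines p lines.length i (by omega)

theorem drop_takeWhile_length {α : Type} (p : α → Bool) (xs : List α) :
    xs.drop (xs.takeWhile p).length = xs.dropWhile p := by
  induction xs with
  | nil => rfl
  | cons x xs ih =>
    by_cases h : p x
    · rw [List.takeWhile_cons_of_pos h, List.dropWhile_cons_of_pos h]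
      simpa using ih
    · rw [List.takeWhile_cons_of_neg (by simp [h]), List.dropWhile_cons_of_neg (by simp [h])]
      simp

theorem take_takeWhile_length {α : Type} (p : α → Bool) (xs : List α) :
    xs.take (xs.takeWhile p).length = xs.takeWhile p := by
  induction xs with
  | nil => rfl
  | cons x xs ih =>
    by_cases h : p x
    · rw [List.takeWhile_cons_of_pos h]
      simpa using ih
    · rw [List.takeWhile_cons_of_neg (by simp [h])]
      simp

theorem head_dropWhile_false {α : Type} (p : α → Bool) (xs : List α) (y : α) (ys : List α)
    (h : xs.dropWhile p = y :: ys) : p y = false := by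
  have hne : xs.dropWhile p ≠ [] := by simp [h]
  have h2 := List.head_dropWhile_not (l := xs) (p := p) hne
  have h3 : (xs.dropWhile p).head hne = y := by simp [h]
  rw [h3] at h2
  simpa using h2

-- B consumes a run of kept lines by appending them to the buffer
theorem bufLoop_takeWhile (xs buf : List String) :
    bufLoop xs buf = bufLoop (xs.dropWhile keepLineB) (buf ++ xs.takeWhile keepLineB) := by
  induction xs generalizing buf with
  | nil => simp [List.dropWhile, List.takeWhile]
  | cons x xs ih =>
    by_cases h : keepLineB x
    · rw [List.dropWhile_cons_of_pos h, List.takeWhile_cons_of_pos h]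
      rw [bufLoop, if_pos h, ih]
      simp
    · rw [List.dropWhile_cons_of_neg (by simp [h]), List.takeWhile_cons_of_neg (by simp [h])]
      simp

-- B skips leading non-kept lines while the buffer is empty
theorem bufLoop_skip (xs : List String) :
    bufLoop xs [] = bufLoop (xs.dropWhile (fun l => !keepLineB l)) [] := by
  induction xs with
  | nil => rfl
  | cons x xs ih =>
    by_cases h : keepLineB x
    · rw [List.dropWhile_cons_of_neg (by simp [h])]
    · rw [List.dropWhile_cons_of_pos (by simp [h])]
      rw [bufLoop, if_neg (by simp [h])]
      simpa using ih

-- with a non-empty buffer and a blocked head (or the end of input), B flushes the buffer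
theorem bufLoop_flush (xs buf : List String) (hbuf : buf ≠ [])
    (hxs : xs = [] ∨ ∃ y ys, xs = y :: ys ∧ keepLineB y = false) :
    bufLoop xs buf = PySem.Str.join "\n" buf :: bufLoop xs [] := by
  have hb : buf.isEmpty = false := by simpa using hbuf
  rcases hxs with h | ⟨y, ys, rfl, hy⟩
  · subst h
    simp [bufLoop, hb]
  · rw [bufLoop, if_neg (by simp [hy]), if_neg (by simp [hb])]
    conv_rhs => rw [bufLoop, if_neg (by simp [hy])]
    simp

theorem main_loop (n : Nat) : ∀ (lines : List String) (last : Nat) (acc : List String),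
    lines.length - last ≤ n → outerA lines last acc = acc ++ bufLoop (lines.drop last) [] := by
  induction n with
  | zero =>
    intro lines last acc h
    rw [outerA, dif_neg (by omega), List.drop_eq_nil_of_le (by omega)]
    simp [bufLoop]
  | succ n ih =>
    intro lines last acc h
    by_cases hlt : last < lines.length
    · set first := advA lines (fun l => !keepLineA usefulWords l) last with hfirst
      set last' := advA lines (fun l => keepLineA usefulWords l) (first + 1) with hlast'
      have hstep : outerA lines last acc = outerA lines last'
          (if first ≠ lines.length then
            acc ++ [PySem.Str.join "\n" (PySem.List.slice lines (some (first : Int)) (some (last' : Int)))]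
          else acc) := by
        rw [outerA, dif_pos hlt]
      have hP : (fun l => !keepLineA usefulWords l) = (fun l => !keepLineB l) := by
        funext l; rw [keepLineA_eq_keepLineB]
      have hK : (fun l => keepLineA usefulWords l) = keepLineB := by
        funext l; rw [keepLineA_eq_keepLineB]
      have hfe : first = last + ((lines.drop last).takeWhile (fun l => !keepLineB l)).length := by
        rw [hfirst, hP, advA_eq]
      have hdropfirst : lines.drop first = (lines.drop last).dropWhile (fun l => !keepLineB l) := by
        rw [hfe, ← List.drop_drop, drop_takeWhile_length]
      have hfle : first ≤ lines.length := by
        have h1 : ((lines.drop last).takeWhile (fun l => !keepLineB l)).length ≤ (lines.drop last).length :=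
          (List.takeWhile_sublist _).length_le
        have h2 : (lines.drop last).length = lines.length - last := List.length_drop
        omega
      have hrhs : bufLoop (lines.drop last) [] = bufLoop (lines.drop first) [] := by
        rw [bufLoop_skip, hdropfirst]
      have hflast : last ≤ first := by rw [hfirst]; exact advA_le _ _ _
      have hl'ge : first + 1 ≤ last' := by rw [hlast']; exact advA_le _ _ _
      by_cases hfeq : first = lines.length
      · -- no kept line remains: no yield, the recursive call returns acc
        rw [hstep, if_neg (not_not_intro hfeq)]
        rw [ih lines last' acc (by omega)]
        rw [List.drop_eq_nil_of_le (by omega), hrhs, hfeq,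
          List.drop_eq_nil_of_le (le_refl _)]
      · have hflt : first < lines.length := by omega
        have hd : lines.drop first = lines[first] :: lines.drop (first + 1) :=
          List.drop_eq_getElem_cons hflt
        have hkh : keepLineB lines[first] = true := by
          have := head_dropWhile_false (fun l => !keepLineB l) (lines.drop last)
            lines[first] (lines.drop (first + 1)) (by rw [← hdropfirst, hd])
          simpa using this
        have hl'e : last' = first + 1 + ((lines.drop (first + 1)).takeWhile keepLineB).length := by
          rw [hlast', hK, advA_eq]
        have hdroplast' : lines.drop last' = (lines.drop (first + 1)).dropWhile keepLineB := by
          have h1 : lines.drop last' =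
              (lines.drop (first + 1)).drop ((lines.drop (first + 1)).takeWhile keepLineB).length := by
            rw [List.drop_drop]
            congr 1
          rw [h1, drop_takeWhile_length]
        have hslice : PySem.List.slice lines (some (first : Int)) (some (last' : Int)) =
            lines[first] :: (lines.drop (first + 1)).takeWhile keepLineB := by
          rw [PySem.List.slice_natCast]
          have hlf : last' - first = ((lines.drop (first + 1)).takeWhile keepLineB).length + 1 := by
            omega
          rw [hlf, hd, List.take_succ_cons, take_takeWhile_length]
        have hside : lines.drop last' = [] ∨
            ∃ y ys, lines.drop last' = y :: ys ∧ keepLineB y = false := by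
          rcases he : lines.drop last' with _ | ⟨y, ys⟩
          · exact Or.inl rfl
          · exact Or.inr ⟨y, ys, rfl,
              head_dropWhile_false keepLineB (lines.drop (first + 1)) y ys (by rw [← hdroplast', he])⟩
        have hR : bufLoop (lines.drop last) [] =
            PySem.Str.join "\n" (lines[first] :: (lines.drop (first + 1)).takeWhile keepLineB) ::
              bufLoop (lines.drop last') [] := by
          rw [hrhs, hd, bufLoop, if_pos hkh, bufLoop_takeWhile, ← hdroplast']
          rw [bufLoop_flush (lines.drop last')
              (([] ++ [lines[first]]) ++ (lines.drop (first + 1)).takeWhile keepLineB) (by simp) hside]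
          simp
        rw [hstep, if_pos hfeq]
        rw [ih lines last' _ (by omega), hR, hslice]
        simp
    · rw [outerA, dif_neg hlt, List.drop_eq_nil_of_le (by omega)]
      simp [bufLoop]

-- ===== VERDICT (by name: the statement is the Claim_ definition above) =====
theorem break_text_into_chunks_spec : Claim_equal_break_text_into_chunks := by
  intro text _
  unfold Spec_break_text_into_chunks break_text_into_chunks break_text_into_chunks_alt
  rw [main_loop ((PySem.Str.split? text "\n").getD []).length _ 0 [] (by omega)]
  simp
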